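-- pv_equiv track=rewrite | github.com/aremath/texture_gen | src/median_cut.py | cuts
-- ===== SOURCE A (Python) =====
-- def max_range(pixels):
--     """Find the index of the value (r,g,b) along which
--     pixels has the maximum range"""
--     r = [p[0] for p in pixels]
--     g = [p[1] for p in pixels]
--     b = [p[2] for p in pixels]
--     r_range = max(r) - min(r)
--     g_range = max(g) - min(g)
--     b_range = max(b) - min(b)
--     ranges = [r_range, g_range, b_range]
--     max_range = max(ranges)
--     for i, m_range in enumerate(ranges):
--         if m_range == max_range:
--             return i
--
-- def cut(pixel_count):
--     # pick i is the color along which pixel_count has the largest range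
--     i = max_range(list(pixel_count.keys()))
--     # sort the pixels by their i-value
--     spixels = sorted(list(pixel_count.keys()), key=lambda x: x[i])
--     cut1 = collections.Counter()
--     cut2 = collections.Counter()
--     n = len(spixels)
--     for i,p in enumerate(spixels):
--         if i < n/2:
--             cut1[p] = pixel_count[p]
--         else:
--             cut2[p] = pixel_count[p]
--     return [cut1, cut2]
--
-- def cuts(pixel_count, n):
--     current = [pixel_count]
--     for i in range(n):
--         final = []
--         current = [cut(x) for x in current]
--         for c in current:
--             final.extend(c)
--         current = final
--     return current
-- ===== SOURCE B (Python) =====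
-- def _widest_axis(pixels):
--     ranges = [max(p[j] for p in pixels) - min(p[j] for p in pixels) for j in range(3)]
--     return ranges.index(max(ranges))
--
-- def _split(pixel_count):
--     axis = _widest_axis(list(pixel_count))
--     spixels = sorted(pixel_count, key=lambda p: p[axis])
--     half = (len(spixels) + 1) // 2
--     c1 = {p: pixel_count[p] for p in spixels[:half]}
--     c2 = {p: pixel_count[p] for p in spixels[half:]}
--     return c1, c2
--
-- def cuts(pixel_count, n):
--     if n <= 0:
--         return [pixel_count]
--     c1, c2 = _split(pixel_count)
--     return cuts(c1, n - 1) + cuts(c2, n - 1)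
-- ===== Notes on version B (the rewrite author's own statement) =====
-- stated objective: alternative
-- what changed: cuts is a divide-and-conquer recursion (split once, recurse on each half, concatenate; DFS leaf order equals A's round-by-round order because the split tree is complete) instead of A's level-by-level worklist; the split helper slices the sorted key list at the midpoint instead of an indexed loop with a float comparison.
import Mathlib
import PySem

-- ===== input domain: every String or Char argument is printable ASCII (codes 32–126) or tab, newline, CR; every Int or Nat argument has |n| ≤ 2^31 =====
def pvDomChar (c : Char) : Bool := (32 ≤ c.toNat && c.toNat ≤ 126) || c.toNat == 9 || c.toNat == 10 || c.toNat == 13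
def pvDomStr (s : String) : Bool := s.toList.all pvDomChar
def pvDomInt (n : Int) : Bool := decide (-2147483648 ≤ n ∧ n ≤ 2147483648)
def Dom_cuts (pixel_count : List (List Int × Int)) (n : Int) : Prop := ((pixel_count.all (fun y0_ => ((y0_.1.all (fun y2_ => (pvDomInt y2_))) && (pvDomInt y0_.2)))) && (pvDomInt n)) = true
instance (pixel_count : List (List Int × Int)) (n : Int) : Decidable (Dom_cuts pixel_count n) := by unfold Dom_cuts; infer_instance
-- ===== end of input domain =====

-- B replaces the level-by-level worklist by a divide-and-conquer recursion and its split
-- helper slices the sorted key list at the midpoint instead of A's indexed loop with a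
-- float comparison; alternative structure, same asymptotic cost.

-- ===== PORT A =====
-- max_range(pixels); none = the ValueError raised by max()/min() of an empty list
def maxRangeA (pixels : List (List Int)) : Option Int :=
  let r := pixels.map (fun p => PySem.List.pyGetD p 0 0)
  let g := pixels.map (fun p => PySem.List.pyGetD p 1 0)
  let b := pixels.map (fun p => PySem.List.pyGetD p 2 0)
  match PySem.List.max? r (fun x => x), PySem.List.min? r (fun x => x),
        PySem.List.max? g (fun x => x), PySem.List.min? g (fun x => x),
        PySem.List.max? b (fun x => x), PySem.List.min? b (fun x => x) with
  | some rMax, some rMin, some gMax, some gMin, some bMax, some bMin =>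
    let ranges := [rMax - rMin, gMax - gMin, bMax - bMin]
    let maxRange := (PySem.List.max? ranges (fun x => x)).getD 0  -- always some: ranges ≠ []
    -- for i, m_range in enumerate(ranges): if m_range == max_range: return i
    match (PySem.List.enumerate ranges).find? (fun im => im.2 == maxRange) with
    | some im => some im.1
    | none => none  -- the fall-through 'return None' (unreachable: max_range ∈ ranges)
  | _, _, _, _, _, _ => none

-- cut(pixel_count); none = a raise inside cut (propagated from max_range)
def cutA (pixel_count : List (List Int × Int)) : Option (List (List (List Int × Int))) :=
  let d := PySem.Dict.mk pixel_count
  match maxRangeA d.keys with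
  | none => none
  | some i =>
    let spixels := PySem.List.sorted d.keys (fun x => PySem.List.pyGetD x i 0) false
    let n := spixels.length
    -- for i,p in enumerate(spixels): if i < n/2 …  (on ints, i < n/2 ⟺ 2*i < n, exact)
    let st := (PySem.List.enumerate spixels).foldl
      (fun (st : PySem.Dict (List Int) Int × PySem.Dict (List Int) Int) ip =>
        if 2 * ip.1 < (n : Int) then (st.1.insert ip.2 (d.getD ip.2 0), st.2)
        else (st.1, st.2.insert ip.2 (d.getD ip.2 0)))
      (PySem.Dict.empty, PySem.Dict.empty)
    some [st.1.items, st.2.items]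

-- for i in range(n): current = [cut(x) for x in current]; final extends each pair;
-- a raise in any cut aborts the whole call (none propagates and the loop stops)
def cutsLoopA (k : Nat) (current : List (List (List Int × Int))) :
    Option (List (List (List Int × Int))) :=
  match k with
  | 0 => some current
  | Nat.succ k' =>
    match current.mapM cutA with
    | none => none
    | some cs => cutsLoopA k' (cs.foldl (fun final c => final ++ c) [])

def cuts (pixel_count : List (List Int × Int)) (n : Int) : List (List (List Int × Int)) :=
  (cutsLoopA n.toNat [pixel_count]).getD []   -- the default is never used inside Pre_

-- ===== PORT B =====
-- _widest_axis(pixels); none = the ValueError raised by max()/min() of an empty sequence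
def widestAxisB (pixels : List (List Int)) : Option Int :=
  match (PySem.List.pyRange 0 3 1).mapM (fun j =>
    match PySem.List.max? (pixels.map (fun p => PySem.List.pyGetD p j 0)) (fun x => x),
          PySem.List.min? (pixels.map (fun p => PySem.List.pyGetD p j 0)) (fun x => x) with
    | some M, some m => some (M - m)
    | _, _ => none) with
  | none => none
  | some ranges =>
    some ((PySem.List.index? ranges ((PySem.List.max? ranges (fun x => x)).getD 0)).getD 0 : Int)

-- _split(pixel_count); none = a raise propagated from _widest_axis
def splitB (pixel_count : List (List Int × Int)) :
    Option ((List (List Int × Int)) × (List (List Int × Int))) :=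
  let d := PySem.Dict.mk pixel_count
  match widestAxisB d.keys with
  | none => none
  | some axis =>
    let spixels := PySem.List.sorted d.keys (fun p => PySem.List.pyGetD p axis 0) false
    let half := PySem.Int.floordiv ((spixels.length : Int) + 1) 2
    let c1 := (PySem.List.slice spixels none (some half)).foldl
      (fun (e : PySem.Dict (List Int) Int) p => e.insert p (d.getD p 0)) PySem.Dict.empty
    let c2 := (PySem.List.slice spixels (some half) none).foldl
      (fun (e : PySem.Dict (List Int) Int) p => e.insert p (d.getD p 0)) PySem.Dict.empty
    some (c1.items, c2.items)

-- 'if n <= 0: return [pixel_count]' with the recursion on n written structurally on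
-- n.toNat (n ≤ 0 is exactly toNat = 0; each recursive call passes n - 1); a raise in
-- either recursive call propagates (none)
def cutsAltGo (pixel_count : List (List Int × Int)) (k : Nat) :
    Option (List (List (List Int × Int))) :=
  match k with
  | 0 => some [pixel_count]
  | Nat.succ k' =>
    match splitB pixel_count with
    | none => none
    | some s =>
      match cutsAltGo s.1 k', cutsAltGo s.2 k' with
      | some a, some b => some (a ++ b)
      | _, _ => none

def cuts_alt (pixel_count : List (List Int × Int)) (n : Int) : List (List (List Int × Int)) :=
  (cutsAltGo pixel_count n.toNat).getD []   -- the default is never used inside Pre_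

-- ===== PRECONDITION & SPEC =====
-- Pre_ excludes association lists with duplicate keys (they do not denote a Python dict:
-- Python merges the duplicates before the call, so both programs see the same merged dict
-- and agree there) and exactly the inputs on which A raises: n ≥ 1 with an empty dict or
-- with fewer than 2^(n-1) pixels (an empty group reaches cut: ValueError from max([])),
-- or with some key shorter than 3 (IndexError in max_range). 'len ≥ 2^(n-1)' is written
-- as 'n - 1 ≤ log2 len' so that it is cheap to decide for large n.
def Pre_cuts (pixel_count : List (List Int × Int)) (n : Int) : Prop :=
  (pixel_count.map Prod.fst).Nodup ∧
  (n ≤ 0 ∨ (pixel_count ≠ [] ∧ (∀ p ∈ pixel_count, 3 ≤ p.1.length) ∧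
            n.toNat - 1 ≤ Nat.log2 pixel_count.length))
instance (pixel_count : List (List Int × Int)) (n : Int) : Decidable (Pre_cuts pixel_count n) := by
  unfold Pre_cuts; infer_instance

def pvWitness_cuts : (List (List Int × Int)) × Int := ([([0, 0, 0], 1), ([1, 2, 3], 2)], 2)

def Spec_cuts (pixel_count : List (List Int × Int)) (n : Int) (out : List (List (List Int × Int))) : Prop := out = cuts_alt pixel_count n
instance (pixel_count : List (List Int × Int)) (n : Int) (out : List (List (List Int × Int))) : Decidable (Spec_cuts pixel_count n out) := by unfold Spec_cuts; infer_instance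

-- ===== CLAIM (what is proved, stated in full; the proofs are below) =====
def Claim_equal_cuts : Prop := ∀ (pixel_count : List (List Int × Int)) (n : Int), Dom_cuts pixel_count n → Pre_cuts pixel_count n → Spec_cuts pixel_count n (cuts pixel_count n)

-- ===== LEMMAS AND PROOFS =====

-- the first index at which the 3-element list carries its maximum, computed by A's
-- enumerate-scan and by B's index-of-max, is the same
theorem find_eq_index3 (a b c m : Int) (hm : m = a ∨ m = b ∨ m = c) :
    (match (PySem.List.enumerate [a, b, c]).find? (fun im => im.2 == m) with
     | some im => some im.1
     | none => none)
    = some ((PySem.List.index? [a, b, c] m).getD 0 : Int) := by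
  by_cases h1 : a = m
  · simp [PySem.List.enumerate, PySem.List.index?_eq_idxOf?, List.idxOf?, List.findIdx?,
      List.findIdx?.go, h1]
  · by_cases h2 : b = m
    · simp [PySem.List.enumerate, PySem.List.index?_eq_idxOf?, List.idxOf?, List.findIdx?,
        List.findIdx?.go, h1, h2]
    · have h3 : c = m := by rcases hm with h | h | h <;> simp_all
      simp [PySem.List.enumerate, PySem.List.index?_eq_idxOf?, List.idxOf?, List.findIdx?,
        List.findIdx?.go, h1, h2, h3]

theorem getD_max?_mem3 (a b c : Int) :
    ((PySem.List.max? [a, b, c] (fun x => x)).getD 0) = a ∨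
    ((PySem.List.max? [a, b, c] (fun x => x)).getD 0) = b ∨
    ((PySem.List.max? [a, b, c] (fun x => x)).getD 0) = c := by
  rcases h : PySem.List.max? [a, b, c] (fun x => x) with _ | m
  · exact absurd ((PySem.List.max?_eq_none_iff _ _).mp h) (by simp)
  · have hm := PySem.List.max?_mem h
    simp only [Option.getD_some]
    simpa using hm

theorem maxRange_eq_widest (pixels : List (List Int)) (hne : pixels ≠ []) :
    ∃ w, maxRangeA pixels = some w ∧ widestAxisB pixels = some w := by
  have hr : PySem.List.pyRange 0 3 1 = [0, 1, 2] := by decide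
  unfold maxRangeA widestAxisB
  rw [hr]
  have hmapne : ∀ (j : Int), pixels.map (fun p => PySem.List.pyGetD p j 0) ≠ [] := by
    intro j h; exact hne (List.map_eq_nil_iff.mp h)
  rcases hrM : PySem.List.max? (pixels.map (fun p => PySem.List.pyGetD p 0 0)) (fun x => x)
    with _ | rMax
  · exact absurd ((PySem.List.max?_eq_none_iff _ _).mp hrM) (hmapne 0)
  rcases hrm : PySem.List.min? (pixels.map (fun p => PySem.List.pyGetD p 0 0)) (fun x => x)
    with _ | rMin
  · exact absurd ((PySem.List.min?_eq_none_iff _ _).mp hrm) (hmapne 0)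
  rcases hgM : PySem.List.max? (pixels.map (fun p => PySem.List.pyGetD p 1 0)) (fun x => x)
    with _ | gMax
  · exact absurd ((PySem.List.max?_eq_none_iff _ _).mp hgM) (hmapne 1)
  rcases hgm : PySem.List.min? (pixels.map (fun p => PySem.List.pyGetD p 1 0)) (fun x => x)
    with _ | gMin
  · exact absurd ((PySem.List.min?_eq_none_iff _ _).mp hgm) (hmapne 1)
  rcases hbM : PySem.List.max? (pixels.map (fun p => PySem.List.pyGetD p 2 0)) (fun x => x)
    with _ | bMax
  · exact absurd ((PySem.List.max?_eq_none_iff _ _).mp hbM) (hmapne 2)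
  rcases hbm : PySem.List.min? (pixels.map (fun p => PySem.List.pyGetD p 2 0)) (fun x => x)
    with _ | bMin
  · exact absurd ((PySem.List.min?_eq_none_iff _ _).mp hbm) (hmapne 2)
  refine ⟨(PySem.List.index? [rMax - rMin, gMax - gMin, bMax - bMin]
      ((PySem.List.max? [rMax - rMin, gMax - gMin, bMax - bMin] (fun x => x)).getD 0)).getD 0,
      ?_, ?_⟩
  · simp only [hrM, hrm, hgM, hgm, hbM, hbm]
    exact find_eq_index3 _ _ _ _ (getD_max?_mem3 _ _ _)
  · simp only [List.mapM_cons, List.mapM_nil, hrM, hrm, hgM, hgm, hbM, hbm]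
    rfl

-- A's indexed split loop equals take/drop at the midpoint (2*i < nn ⟺ i < (nn+1)/2)
theorem split_fold {κ : Type} (f : PySem.Dict (List Int) Int → κ → PySem.Dict (List Int) Int)
    (nn : Nat) (l : List κ) (s : Nat)
    (x y : PySem.Dict (List Int) Int) :
    (PySem.List.enumerate l (s : Int)).foldl
      (fun st ip => if 2 * ip.1 < (nn : Int) then (f st.1 ip.2, st.2) else (st.1, f st.2 ip.2))
      (x, y)
    = ((l.take ((nn + 1) / 2 - s)).foldl f x, (l.drop ((nn + 1) / 2 - s)).foldl f y) := by
  induction l generalizing s x y with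
  | nil => simp [PySem.List.enumerate_nil]
  | cons p t ih =>
    rw [PySem.List.enumerate_cons, List.foldl_cons]
    by_cases hs : 2 * s < nn
    · have hcond : (2 * (s : Int) < (nn : Int)) := by exact_mod_cast (by omega : (2 * s : Int) < nn)
      have hk : (nn + 1) / 2 - s = ((nn + 1) / 2 - (s + 1)) + 1 := by omega
      rw [if_pos hcond, hk]
      have := ih (s := s + 1) (x := f x p) (y := y)
      rw [show ((s : Int) + 1) = ((s + 1 : Nat) : Int) by push_cast; ring] at *
      rw [this]
      simp
    · have hcond : ¬ (2 * (s : Int) < (nn : Int)) := by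
        intro h; exact hs (by exact_mod_cast h)
      have hk : (nn + 1) / 2 - s = 0 := by omega
      have hk' : (nn + 1) / 2 - (s + 1) = 0 := by omega
      rw [if_neg hcond]
      have := ih (s := s + 1) (x := x) (y := f y p)
      rw [show ((s : Int) + 1) = ((s + 1 : Nat) : Int) by push_cast; ring]
      rw [this, hk, hk']
      simp

theorem half_eq (n : Nat) :
    PySem.Int.floordiv ((n : Int) + 1) 2 = (((n + 1) / 2 : Nat) : Int) := by
  have : ((n : Int) + 1) = ((n + 1 : Nat) : Int) := by push_cast; ring
  rw [this]
  exact_mod_cast PySem.Int.floordiv_natCast (n + 1) 2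

theorem keys_mk_eq (pc : List (List Int × Int)) :
    (PySem.Dict.mk pc).keys = pc.map Prod.fst := rfl

-- both programs split a non-empty group into the SAME two halves, whose shapes are the
-- take/drop of the sorted key list at the midpoint
theorem split_full (pc : List (List Int × Int)) (hne : pc ≠ [])
    (hnd : (pc.map Prod.fst).Nodup) :
    ∃ c1 c2, cutA pc = some [c1, c2] ∧ splitB pc = some (c1, c2) ∧
      c1.length = (pc.length + 1) / 2 ∧ c2.length = pc.length - (pc.length + 1) / 2 ∧
      (c1.map Prod.fst).Nodup ∧ (c2.map Prod.fst).Nodup := by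
  have hkne : (PySem.Dict.mk pc).keys ≠ [] := by
    rw [keys_mk_eq]; exact fun h => hne (List.map_eq_nil_iff.mp h)
  obtain ⟨w, hA, hB⟩ := maxRange_eq_widest (PySem.Dict.mk pc).keys hkne
  set d := PySem.Dict.mk pc with hd
  set sp := PySem.List.sorted d.keys (fun p => PySem.List.pyGetD p w 0) false with hsp
  have hsplen : sp.length = pc.length := by
    rw [hsp, PySem.List.length_sorted, keys_mk_eq, List.length_map]
  have hspnd : sp.Nodup := by
    have hperm := PySem.List.sorted_perm d.keys (fun p => PySem.List.pyGetD p w 0) false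
    exact hperm.nodup_iff.mpr (by rw [keys_mk_eq]; exact hnd)
  have hitems : ∀ (l : List (List Int)), l.Nodup →
      ((l.foldl (fun (e : PySem.Dict (List Int) Int) p => e.insert p (d.getD p 0))
        PySem.Dict.empty).items) = l.map (fun p => (p, d.getD p 0)) := by
    intro l hl
    have := PySem.Dict.items_foldl_insert_fresh l (fun a => a) (fun p => d.getD p 0)
      PySem.Dict.empty (by intro a _; exact PySem.Dict.contains_empty a)
      (by simpa using hl)
    simpa using this
  have h1 := hitems (sp.take ((sp.length + 1) / 2)) (hspnd.sublist (List.take_sublist _ _))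
  have h2 := hitems (sp.drop ((sp.length + 1) / 2)) (hspnd.sublist (List.drop_sublist _ _))
  refine ⟨(sp.take ((sp.length + 1) / 2)).map (fun p => (p, d.getD p 0)),
          (sp.drop ((sp.length + 1) / 2)).map (fun p => (p, d.getD p 0)), ?_, ?_, ?_, ?_, ?_, ?_⟩
  · -- cutA produces these two halves
    simp only [cutA]
    rw [hA]
    dsimp only
    rw [← hd, ← hsp]
    have h := split_fold (fun e p => e.insert p (d.getD p 0)) sp.length sp 0
      PySem.Dict.empty PySem.Dict.empty
    simp only [Nat.cast_zero, Nat.sub_zero] at h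
    rw [h, h1, h2]
  · -- splitB produces the same
    simp only [splitB]
    rw [hB]
    dsimp only
    rw [← hd, ← hsp]
    simp only [half_eq, PySem.List.slice_to_natCast, PySem.List.slice_from_natCast]
    rw [h1, h2]
  · rw [List.length_map, List.length_take, hsplen]; omega
  · rw [List.length_map, List.length_drop, hsplen]
  · rw [List.map_map]
    have hid : (Prod.fst ∘ fun p : List Int => (p, d.getD p 0)) = fun p : List Int => p := by
      funext p; rfl
    rw [hid]
    simpa using hspnd.sublist (List.take_sublist ((sp.length + 1) / 2) sp)
  · rw [List.map_map]
    have hid : (Prod.fst ∘ fun p : List Int => (p, d.getD p 0)) = fun p : List Int => p := by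
      funext p; rfl
    rw [hid]
    simpa using hspnd.sublist (List.drop_sublist ((sp.length + 1) / 2) sp)

theorem mapM_opt_append {α β : Type} (f : α → Option β) (xs ys : List α) :
    (xs ++ ys).mapM f
    = match xs.mapM f, ys.mapM f with
      | some a, some b => some (a ++ b)
      | _, _ => none := by
  induction xs with
  | nil =>
    simp only [List.nil_append, List.mapM_nil]
    rcases ys.mapM f with _ | b <;> rfl
  | cons x t ih =>
    simp only [List.cons_append, List.mapM_cons, ih]
    rcases hfx : f x with _ | v
    · rfl
    · rcases ht : t.mapM f with _ | a
      · rfl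
      · rcases hy : ys.mapM f with _ | b <;> rfl

theorem cutsLoopA_succ (k : Nat) (cur : List (List (List Int × Int))) :
    cutsLoopA (k + 1) cur
    = match cur.mapM cutA with
      | none => none
      | some cs => cutsLoopA k (cs.foldl (fun final c => final ++ c) []) := rfl

theorem foldl_append_init {α : Type} (l : List (List α)) (init : List α) :
    l.foldl (fun a c => a ++ c) init = init ++ l.flatten := by
  induction l generalizing init with
  | nil => simp
  | cons h t ih => simp [List.foldl_cons, ih]

theorem loop_append (k : Nat) (xs ys : List (List (List Int × Int))) :
    cutsLoopA k (xs ++ ys)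
    = match cutsLoopA k xs, cutsLoopA k ys with
      | some a, some b => some (a ++ b)
      | _, _ => none := by
  induction k generalizing xs ys with
  | zero => simp [cutsLoopA]
  | succ k ih =>
    rw [cutsLoopA_succ, cutsLoopA_succ, cutsLoopA_succ, mapM_opt_append]
    rcases hx : xs.mapM cutA with _ | cx
    · rfl
    rcases hy : ys.mapM cutA with _ | cy
    · have hred : (match some cx with
          | (none : Option (List (List (List (List Int × Int))))) => (none : Option (List (List (List Int × Int))))
          | some cs => cutsLoopA k (cs.foldl (fun final c => final ++ c) []))
          = cutsLoopA k (cx.foldl (fun final c => final ++ c) []) := rfl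
      rw [hred]
      rcases cutsLoopA k (cx.foldl (fun final c => final ++ c) []) with _ | a <;> rfl
    · show cutsLoopA k ((cx ++ cy).foldl (fun final c => final ++ c) []) = _
      rw [foldl_append_init, List.flatten_append, List.nil_append,
        show cx.flatten ++ cy.flatten
          = (cx.foldl (fun final c => final ++ c) []) ++ (cy.foldl (fun final c => final ++ c) [])
          by rw [foldl_append_init, foldl_append_init]; simp,
        ih]

-- the worklist of A, run k rounds on a single group with at least 2^(k-1) pixels
-- (stated as 2^k ≤ 2·len, vacuous info at k = 0), is B's divide-and-conquer on it
theorem main_eq (k : Nat) : ∀ (pc : List (List Int × Int)),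
    (pc.map Prod.fst).Nodup → (k = 0 ∨ 2 ^ k ≤ 2 * pc.length) →
    ∃ out, cutsLoopA k [pc] = some out ∧ cutsAltGo pc k = some out := by
  induction k with
  | zero => intro pc _ _; exact ⟨[pc], rfl, rfl⟩
  | succ k ih =>
    intro pc hnd hlen
    have hlen' : 2 ^ (k + 1) ≤ 2 * pc.length := by
      rcases hlen with h | h
      · exact absurd h (Nat.succ_ne_zero k)
      · exact h
    have hk1 : 2 ≤ 2 ^ (k + 1) := by
      have : 2 ^ 1 ≤ 2 ^ (k + 1) := Nat.pow_le_pow_right (by norm_num) (by omega)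
      simpa using this
    have hne : pc ≠ [] := by
      intro h
      rw [h] at hlen'
      simp at hlen'
    obtain ⟨c1, c2, hcA, hcB, hl1, hl2, hn1, hn2⟩ := split_full pc hne hnd
    obtain ⟨out1, hA1, hB1⟩ : ∃ out, cutsLoopA k [c1] = some out ∧ cutsAltGo c1 k = some out := by
      refine ih _ hn1 ?_
      right
      rw [hl1, Nat.pow_succ] at *
      omega
    obtain ⟨out2, hA2, hB2⟩ : ∃ out, cutsLoopA k [c2] = some out ∧ cutsAltGo c2 k = some out := by
      rcases Nat.eq_zero_or_pos k with h0 | hpos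
      · exact ih _ hn2 (Or.inl h0)
      · refine ih _ hn2 ?_
        right
        rw [hl2]
        obtain ⟨j, hj⟩ : ∃ j, k = j + 1 := ⟨k - 1, by omega⟩
        subst hj
        have e1 : 2 ^ (j + 1) = 2 * 2 ^ j := by ring
        have e2 : 2 ^ (j + 1 + 1) = 4 * 2 ^ j := by ring
        rw [e1]
        rw [e2] at hlen'
        omega
    refine ⟨out1 ++ out2, ?_, ?_⟩
    · have hmap : [pc].mapM cutA = some [[c1, c2]] := by simp [List.mapM_cons, hcA]
      rw [cutsLoopA, hmap]
      simp only [List.foldl_cons, List.foldl_nil, List.nil_append]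
      have hsplit : c1 :: c2 :: ([] : List (List (List Int × Int))) = [c1] ++ [c2] := rfl
      rw [hsplit, loop_append, hA1, hA2]
    · rw [cutsAltGo, hcB]
      simp only [hB1, hB2]

-- ===== VERDICT (by name: the statement is the Claim_ definition above) =====
theorem cuts_spec : Claim_equal_cuts := by
  intro pc n _ hpre
  obtain ⟨hnodup, hpre2⟩ := hpre
  unfold Spec_cuts cuts cuts_alt
  by_cases hn : n ≤ 0
  · have h0 : n.toNat = 0 := by omega
    rw [h0]
    rfl
  · rcases hpre2 with h | ⟨hne, _, hlog⟩
    · omega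
    · have hlen1 : pc.length ≠ 0 := by
        intro h; exact hne (List.length_eq_zero_iff.mp h)
      have hk1 : 1 ≤ n.toNat := by omega
      have hlen : 2 ^ (n.toNat - 1) ≤ pc.length := (Nat.le_log2 hlen1).mp hlog
      have h2 : 2 ^ n.toNat ≤ 2 * pc.length := by
        calc 2 ^ n.toNat = 2 * 2 ^ (n.toNat - 1) := by
              rw [← Nat.pow_succ']
              congr 1
              omega
          _ ≤ 2 * pc.length := by omega
      obtain ⟨out, hA, hB⟩ := main_eq n.toNat pc hnodup (Or.inr h2)
      rw [hA, hB]
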